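-- pv_equiv track=rewrite | github.com/MartinPellizzer/og | ozonogroup-compiler/util.py | generate_breadcrumbs
-- ===== SOURCE A (Python) =====
-- def generate_breadcrumbs(filepath_in):
--     filepath_chunks = filepath_in.split('/')
--     breadcrumbs = [f.replace('.json', '').title() for f in filepath_chunks[2:-1]]
--     article_name = filepath_chunks[-1].replace('.json', '').replace('-', ' ').title()
--
--     breadcrumbs_hrefs = []
--     total_path = ''
--     for b in breadcrumbs:
--         total_path += b + '/'
--         breadcrumbs_hrefs.append('/' + total_path[:-1].lower() + '.html')
--
--     breadcrumbs_text = total_path.split('/')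
--
--     breadcrumbs_html = []
--     for i in range(len(breadcrumbs_hrefs)):
--         html = f'<a href="{breadcrumbs_hrefs[i]}">{breadcrumbs_text[i]}</a>'
--         breadcrumbs_html.append(html)
--
--     breadcrumbs_html_formatted = [f' > {f}' for f in breadcrumbs_html]
--     breadcrumbs_html_formatted.append(f' > {article_name}')
--
--     breadcrumbs_html_formatted = ''.join(breadcrumbs_html_formatted)
--
--     return breadcrumbs_html_formatted
-- ===== SOURCE B (Python) =====
-- def generate_breadcrumbs(filepath_in):
--     chunks = filepath_in.split('/')
--     breadcrumbs = [c.replace('.json', '').title() for c in chunks[2:-1]]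
--     article_name = chunks[-1].replace('.json', '').replace('-', ' ').title()
--
--     parts = []
--     for i, b in enumerate(breadcrumbs):
--         href = '/' + '/'.join(breadcrumbs[:i+1]).lower() + '.html'
--         parts.append(f' > <a href="{href}">{b}</a>')
--     parts.append(f' > {article_name}')
--     return ''.join(parts)
-- ===== Notes on version B (the rewrite author's own statement) =====
-- stated objective: simpler
-- what changed: Single pass over enumerate(breadcrumbs) computing each href directly from a joined prefix slice, removing A's mutating total_path accumulator, its split-on-separator round-trip through breadcrumbs_text, the separate index loop and the extra formatting pass.
import Mathlib
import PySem

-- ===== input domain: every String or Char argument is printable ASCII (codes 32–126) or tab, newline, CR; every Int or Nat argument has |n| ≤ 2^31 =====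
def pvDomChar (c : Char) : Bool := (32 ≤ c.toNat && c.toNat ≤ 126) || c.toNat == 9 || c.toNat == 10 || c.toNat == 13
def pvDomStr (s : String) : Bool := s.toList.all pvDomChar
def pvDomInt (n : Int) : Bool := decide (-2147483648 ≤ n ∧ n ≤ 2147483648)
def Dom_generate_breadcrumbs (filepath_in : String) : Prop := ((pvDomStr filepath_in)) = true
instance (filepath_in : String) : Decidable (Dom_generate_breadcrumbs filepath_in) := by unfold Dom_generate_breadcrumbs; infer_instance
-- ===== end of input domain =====

-- B builds each breadcrumb anchor in one pass over enumerate(breadcrumbs), computing the href from a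
-- joined prefix slice; this removes A's total_path accumulator, its split('/') round-trip and the
-- separate index/formatting passes (objective: simpler; same output).

-- ===== PORT A =====
-- hand port of Python str.title(): on the ASCII domain a character is "cased" iff it is a letter,
-- so a letter is uppercased after a non-letter (or at the start) and lowercased otherwise — exact there.
def pyTitleGo : Bool → List Char → List Char
  | _, [] => []
  | prev, c :: rest =>
    if PySem.Chars.isalpha c then
      (if prev then PySem.Chars.lowerChar c else PySem.Chars.upperChar c) :: pyTitleGo true rest
    else
      c :: pyTitleGo false rest

def pyTitle (s : List Char) : List Char := pyTitleGo false s

def generate_breadcrumbs (filepath_in : String) : String :=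
  let filepath_chunks := PySem.Chars.splitOn filepath_in.toList ['/']
  let breadcrumbs := (PySem.List.slice filepath_chunks (some 2) (some (-1))).map
    (fun f => pyTitle (PySem.Chars.replace f ".json".toList "".toList))
  let article_name := pyTitle (PySem.Chars.replace
    (PySem.Chars.replace ((PySem.List.pyGet? filepath_chunks (-1)).getD []) ".json".toList "".toList)
    "-".toList " ".toList)
  let st := breadcrumbs.foldl (fun (st : List (List Char) × List Char) b =>
      let total_path := st.2 ++ b ++ ['/']
      (st.1 ++ [['/'] ++ PySem.Chars.lower (PySem.List.slice total_path none (some (-1))) ++ ".html".toList],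
       total_path))
    ([], [])
  let breadcrumbs_hrefs := st.1
  let total_path := st.2
  let breadcrumbs_text := PySem.Chars.splitOn total_path ['/']
  let breadcrumbs_html := (PySem.List.pyRange 0 (breadcrumbs_hrefs.length : Int) 1).foldl
    (fun acc i => acc ++ ["<a href=\"".toList ++ PySem.List.pyGetD breadcrumbs_hrefs i []
      ++ "\">".toList ++ PySem.List.pyGetD breadcrumbs_text i [] ++ "</a>".toList]) []
  let breadcrumbs_html_formatted := breadcrumbs_html.map (fun f => " > ".toList ++ f)
  let breadcrumbs_html_formatted2 := breadcrumbs_html_formatted ++ [" > ".toList ++ article_name]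
  String.ofList (PySem.Chars.join [] breadcrumbs_html_formatted2)

-- ===== PORT B =====
def generate_breadcrumbs_alt (filepath_in : String) : String :=
  let chunks := PySem.Chars.splitOn filepath_in.toList ['/']
  let breadcrumbs := (PySem.List.slice chunks (some 2) (some (-1))).map
    (fun c => pyTitle (PySem.Chars.replace c ".json".toList "".toList))
  let article_name := pyTitle (PySem.Chars.replace
    (PySem.Chars.replace ((PySem.List.pyGet? chunks (-1)).getD []) ".json".toList "".toList)
    "-".toList " ".toList)
  let parts := (PySem.List.enumerate breadcrumbs).foldl (fun acc p =>
      acc ++ [" > <a href=\"".toList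
        ++ (['/'] ++ PySem.Chars.lower (PySem.Chars.join ['/'] (PySem.List.slice breadcrumbs none (some (p.1 + 1)))) ++ ".html".toList)
        ++ "\">".toList ++ p.2 ++ "</a>".toList]) []
  String.ofList (PySem.Chars.join [] (parts ++ [" > ".toList ++ article_name]))

-- ===== PRECONDITION & SPEC =====
def Spec_generate_breadcrumbs (filepath_in : String) (out : String) : Prop := out = generate_breadcrumbs_alt filepath_in
instance (filepath_in : String) (out : String) : Decidable (Spec_generate_breadcrumbs filepath_in out) := by unfold Spec_generate_breadcrumbs; infer_instance

-- ===== CLAIM (what is proved, stated in full; the proofs are below) =====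
def Claim_equal_generate_breadcrumbs : Prop := ∀ (filepath_in : String), Dom_generate_breadcrumbs filepath_in → Spec_generate_breadcrumbs filepath_in (generate_breadcrumbs filepath_in)

-- ===== LEMMAS AND PROOFS =====

-- proof-side specs of A's first loop
def flatSlash (bs : List (List Char)) : List Char := bs.flatMap (fun b => b ++ ['/'])

def hrefsFrom (tp : List Char) : List (List Char) → List (List Char)
  | [] => []
  | b :: bs => (['/'] ++ PySem.Chars.lower (tp ++ b) ++ ".html".toList) :: hrefsFrom (tp ++ b ++ ['/']) bs

theorem flatSlash_cons (b : List Char) (bs : List (List Char)) :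
    flatSlash (b :: bs) = b ++ '/' :: flatSlash bs := by
  simp [flatSlash]

theorem loopA (bs : List (List Char)) : ∀ (hs : List (List Char)) (tp : List Char),
    bs.foldl (fun (st : List (List Char) × List Char) b =>
      let total_path := st.2 ++ b ++ ['/']
      (st.1 ++ [['/'] ++ PySem.Chars.lower (PySem.List.slice total_path none (some (-1))) ++ ".html".toList],
       total_path)) (hs, tp)
    = (hs ++ hrefsFrom tp bs, tp ++ flatSlash bs) := by
  induction bs with
  | nil => intro hs tp; simp [flatSlash, hrefsFrom]
  | cons b bs ih =>
    intro hs tp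
    rw [List.foldl_cons, ih]
    simp only [PySem.List.slice_to_neg_one, hrefsFrom, flatSlash_cons]
    have h1 : (tp ++ b ++ ['/']).dropLast = tp ++ b := by
      rw [List.dropLast_concat]
    rw [h1]
    simp [List.append_assoc]

theorem intercalate_cons_ne {α : Type} (sep x : List α) (l : List (List α)) (h : l ≠ []) :
    List.intercalate sep (x :: l) = x ++ sep ++ List.intercalate sep l := by
  cases l with
  | nil => exact absurd rfl h
  | cons y ys => simp [List.intercalate, List.append_assoc]

theorem hrefsFrom_eq (bs : List (List Char)) : ∀ (tp : List Char),
    hrefsFrom tp bs = (List.range bs.length).map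
      (fun k => ['/'] ++ PySem.Chars.lower (tp ++ List.intercalate ['/'] (bs.take (k+1))) ++ ".html".toList) := by
  induction bs with
  | nil => intro tp; simp [hrefsFrom]
  | cons b bs ih =>
    intro tp
    simp only [hrefsFrom, List.length_cons, List.range_succ_eq_map, List.map_cons, List.map_map, ih]
    congr 1
    · simp [List.intercalate]
    · apply List.map_congr_left
      intro k hk
      simp only [Function.comp_apply, Nat.succ_eq_add_one]
      have hklt := List.mem_range.mp hk
      have hne : bs.take (k+1) ≠ [] := by
        intro hcontra
        rcases List.take_eq_nil_iff.mp hcontra with h | h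
        · exact Nat.succ_ne_zero k h
        · rw [h] at hklt; simp at hklt
      rw [List.take_succ_cons, intercalate_cons_ne _ _ _ hne]
      simp [List.append_assoc]

-- ---- splitOn characterization (single-char separator) ----

theorem splitOn_go_nil (c : Char) (fuel : Nat) (cur : List Char) (acc : List (List Char)) :
    PySem.Chars.splitOn.go [c] fuel [] cur acc = (cur.reverse :: acc).reverse := by
  cases fuel <;> simp [PySem.Chars.splitOn.go]

theorem splitOn_go_cons_ne {c c' : Char} (h : c' ≠ c) (fuel : Nat) (rest cur : List Char) (acc : List (List Char)) :
    PySem.Chars.splitOn.go [c] (fuel + 1) (c' :: rest) cur acc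
      = PySem.Chars.splitOn.go [c] fuel rest (c' :: cur) acc := by
  have hp : ([c].isPrefixOf (c' :: rest)) = false := by
    simp [List.isPrefixOf]
    exact fun h' => absurd h'.symm h
  simp [PySem.Chars.splitOn.go, hp]

theorem splitOn_go_cons_eq (c : Char) (fuel : Nat) (rest cur : List Char) (acc : List (List Char)) :
    PySem.Chars.splitOn.go [c] (fuel + 1) (c :: rest) cur acc
      = PySem.Chars.splitOn.go [c] fuel rest [] (cur.reverse :: acc) := by
  have hp : ([c].isPrefixOf (c :: rest)) = true := by simp [List.isPrefixOf]
  simp [PySem.Chars.splitOn.go, hp]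

theorem splitOn_go_piece (c : Char) (b : List Char) (hb : c ∉ b) :
    ∀ (cur rest : List Char) (acc : List (List Char)) (fuel' : Nat),
    PySem.Chars.splitOn.go [c] (b.length + 1 + fuel') (b ++ c :: rest) cur acc
      = PySem.Chars.splitOn.go [c] fuel' rest [] ((cur.reverse ++ b) :: acc) := by
  induction b with
  | nil =>
    intro cur rest acc fuel'
    have h1 : ([] : List Char).length + 1 + fuel' = fuel' + 1 := by
      simp only [List.length_nil]; omega
    rw [h1]
    simpa using splitOn_go_cons_eq c fuel' rest cur acc
  | cons ch b ihb =>
    intro cur rest acc fuel'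
    have hch : ch ≠ c := by intro h; exact hb (h ▸ List.mem_cons_self)
    have h1 : (ch :: b).length + 1 + fuel' = (b.length + 1 + fuel') + 1 := by simp; omega
    rw [h1, List.cons_append, splitOn_go_cons_ne hch]
    rw [ihb (fun h => hb (List.mem_cons_of_mem _ h)) (ch :: cur) rest acc fuel']
    simp [List.append_assoc]

theorem splitOn_go_flat (bs : List (List Char)) (hbs : ∀ b ∈ bs, '/' ∉ b) :
    ∀ (acc : List (List Char)) (fuel' : Nat),
    PySem.Chars.splitOn.go ['/'] ((flatSlash bs).length + 1 + fuel') (flatSlash bs) [] acc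
      = (([] : List Char) :: (bs.reverse ++ acc)).reverse := by
  induction bs with
  | nil => intro acc fuel'; simp [flatSlash, splitOn_go_nil]
  | cons b bs ih =>
    intro acc fuel'
    rw [flatSlash_cons]
    have hlen : (b ++ '/' :: flatSlash bs).length + 1 + fuel'
        = b.length + 1 + ((flatSlash bs).length + 1 + fuel') := by simp; omega
    rw [hlen, splitOn_go_piece '/' b (hbs b List.mem_cons_self) [] (flatSlash bs) acc _]
    rw [ih (fun x hx => hbs x (List.mem_cons_of_mem _ hx)) ((([] : List Char).reverse ++ b) :: acc) _]
    simp

theorem splitOn_flat (bs : List (List Char)) (hbs : ∀ b ∈ bs, '/' ∉ b) :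
    PySem.Chars.splitOn (flatSlash bs) ['/'] = bs ++ [[]] := by
  show PySem.Chars.splitOn.go ['/'] ((flatSlash bs).length + 1) (flatSlash bs) [] [] = bs ++ [[]]
  have h : (flatSlash bs).length + 1 = (flatSlash bs).length + 1 + 0 := by omega
  rw [h, splitOn_go_flat bs hbs [] 0]
  simp

-- ---- '/'-freeness of the breadcrumb pieces ----

theorem splitOn_go_not_mem (c : Char) : ∀ (fuel : Nat) (l cur : List Char) (acc : List (List Char)),
    l.length ≤ fuel → c ∉ cur → (∀ p ∈ acc, c ∉ p) →
    ∀ p ∈ PySem.Chars.splitOn.go [c] fuel l cur acc, c ∉ p := by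
  intro fuel
  induction fuel with
  | zero =>
    intro l cur acc hl hcur hacc p hp
    have : l = [] := List.eq_nil_of_length_eq_zero (Nat.le_zero.mp hl)
    subst this
    rw [splitOn_go_nil] at hp
    simp only [List.mem_reverse, List.mem_cons] at hp
    rcases hp with h | h
    · subst h; simpa using hcur
    · exact hacc p h
  | succ fuel ih =>
    intro l cur acc hl hcur hacc p hp
    cases l with
    | nil =>
      rw [splitOn_go_nil] at hp
      simp only [List.mem_reverse, List.mem_cons] at hp
      rcases hp with h | h
      · subst h; simpa using hcur
      · exact hacc p h
    | cons c' rest =>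
      by_cases hc : c' = c
      · subst hc
        rw [splitOn_go_cons_eq] at hp
        refine ih rest [] _ (by simpa using Nat.le_of_succ_le_succ (by simpa using hl)) (by simp) ?_ p hp
        intro q hq
        rcases List.mem_cons.mp hq with h | h
        · subst h; simpa using hcur
        · exact hacc q h
      · rw [splitOn_go_cons_ne hc] at hp
        refine ih rest (c' :: cur) acc (by simpa using Nat.le_of_succ_le_succ (by simpa using hl)) ?_ hacc p hp
        intro h
        rcases List.mem_cons.mp h with h | h
        · exact hc h.symm
        · exact hcur h

theorem splitOn_not_mem (c : Char) (s : List Char) (p : List Char)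
    (hp : p ∈ PySem.Chars.splitOn s [c]) : c ∉ p := by
  exact splitOn_go_not_mem c (s.length + 1) s [] [] (by omega) (by simp) (by simp) p hp

theorem replace_go_not_mem (c : Char) (old new : List Char) (hnew : c ∉ new) :
    ∀ (fuel : Nat) (l acc : List Char), c ∉ l → c ∉ acc →
    c ∉ PySem.Chars.replace.go old new fuel l acc := by
  intro fuel
  induction fuel with
  | zero =>
    intro l acc hl hacc
    simp only [PySem.Chars.replace.go]
    simp only [List.mem_append, List.mem_reverse]
    rintro (h | h)
    · exact hacc h
    · exact hl h
  | succ fuel ih =>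
    intro l acc hl hacc
    cases l with
    | nil =>
      simp only [PySem.Chars.replace.go]
      simpa using hacc
    | cons ch t =>
      simp only [PySem.Chars.replace.go]
      split
      · refine ih _ _ ?_ ?_
        · intro h; exact hl (List.mem_of_mem_drop h)
        · intro h
          rcases List.mem_append.mp h with h | h
          · exact hnew (List.mem_reverse.mp h)
          · exact hacc h
      · refine ih t (ch :: acc) (fun h => hl (List.mem_cons_of_mem _ h)) ?_
        intro h
        rcases List.mem_cons.mp h with h | h
        · exact hl (h ▸ List.mem_cons_self)
        · exact hacc h

theorem replace_not_mem (c : Char) (s old new : List Char) (hold : old.isEmpty = false)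
    (hs : c ∉ s) (hnew : c ∉ new) : c ∉ PySem.Chars.replace s old new := by
  unfold PySem.Chars.replace
  rw [hold]
  simp only [Bool.false_eq_true, if_false]
  exact replace_go_not_mem c old new hnew s.length s [] hs (by simp)

theorem lowerChar_ne_slash (d : Char) (h : PySem.Chars.isalpha d = true) :
    PySem.Chars.lowerChar d ≠ '/' := by
  unfold PySem.Chars.lowerChar
  split
  · rename_i hu
    have hb : 65 ≤ d.toNat ∧ d.toNat ≤ 90 := by
      simp [PySem.Chars.isupper, Char.le_def, UInt32.le_iff_toNat_le] at hu
      exact hu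
    intro heq
    have h2 := congrArg Char.toNat heq
    rw [Char.toNat_ofNat] at h2
    have hv : (d.toNat + 32).isValidChar := by left; omega
    rw [if_pos hv] at h2
    have h47 : ('/' : Char).toNat = 47 := rfl
    omega
  · intro heq
    subst heq
    exact absurd h (by decide)


theorem upperChar_ne_slash (d : Char) (h : PySem.Chars.isalpha d = true) :
    PySem.Chars.upperChar d ≠ '/' := by
  unfold PySem.Chars.upperChar
  split
  · rename_i hl
    have hb : 97 ≤ d.toNat ∧ d.toNat ≤ 122 := by
      simp [PySem.Chars.islower, Char.le_def, UInt32.le_iff_toNat_le] at hl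
      exact hl
    intro heq
    have h2 := congrArg Char.toNat heq
    rw [Char.toNat_ofNat] at h2
    have hv : (d.toNat - 32).isValidChar := by left; omega
    rw [if_pos hv] at h2
    have h47 : ('/' : Char).toNat = 47 := rfl
    omega
  · intro heq
    subst heq
    exact absurd h (by decide)


theorem pyTitleGo_not_mem_slash : ∀ (s : List Char) (prev : Bool), '/' ∉ s → '/' ∉ pyTitleGo prev s := by
  intro s
  induction s with
  | nil => intro prev _; simp [pyTitleGo]
  | cons c rest ih =>
    intro prev hs
    have hc : c ≠ '/' := fun h => hs (h ▸ List.mem_cons_self)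
    have hrest : '/' ∉ rest := fun h => hs (List.mem_cons_of_mem _ h)
    simp only [pyTitleGo]
    split
    · rename_i ha
      intro h
      rcases List.mem_cons.mp h with h | h
      · cases prev with
        | true => exact lowerChar_ne_slash c ha (by simpa using h.symm)
        | false => exact upperChar_ne_slash c ha (by simpa using h.symm)
      · exact ih true hrest h
    · intro h
      rcases List.mem_cons.mp h with h | h
      · exact hc h.symm
      · exact ih false hrest h

theorem pyTitle_not_mem_slash (s : List Char) (hs : '/' ∉ s) : '/' ∉ pyTitle s :=
  pyTitleGo_not_mem_slash s false hs

-- ---- the main list-level equality ----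

theorem lit_split : " > <a href=\"".toList = " > ".toList ++ "<a href=\"".toList := by decide

theorem main_lists (bs : List (List Char)) (hbs : ∀ b ∈ bs, '/' ∉ b) (art : List Char) :
    (let st := bs.foldl (fun (st : List (List Char) × List Char) b =>
        let total_path := st.2 ++ b ++ ['/']
        (st.1 ++ [['/'] ++ PySem.Chars.lower (PySem.List.slice total_path none (some (-1))) ++ ".html".toList],
         total_path)) ([], []);
     ((PySem.List.pyRange 0 (st.1.length : Int) 1).foldl
        (fun acc i => acc ++ ["<a href=\"".toList ++ PySem.List.pyGetD st.1 i []
          ++ "\">".toList ++ PySem.List.pyGetD (PySem.Chars.splitOn st.2 ['/']) i [] ++ "</a>".toList]) []).map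
        (fun f => " > ".toList ++ f) ++ [" > ".toList ++ art])
    = ((PySem.List.enumerate bs).foldl (fun acc p =>
        acc ++ [" > <a href=\"".toList
          ++ (['/'] ++ PySem.Chars.lower (PySem.Chars.join ['/'] (PySem.List.slice bs none (some (p.1 + 1)))) ++ ".html".toList)
          ++ "\">".toList ++ p.2 ++ "</a>".toList]) []) ++ [" > ".toList ++ art] := by
  rw [loopA bs [] []]
  simp only [List.nil_append]
  congr 1
  rw [splitOn_flat bs hbs]
  rw [hrefsFrom_eq bs []]
  rw [PySem.List.foldl_append_singleton_eq_map, PySem.List.foldl_append_singleton_eq_map]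
  rw [PySem.List.enumerate_eq_map_pyRange bs []]
  simp only [List.nil_append, List.length_map, List.length_range, List.map_map, PySem.List.len]
  rw [PySem.List.pyRange_one]
  simp only [List.map_map, Int.sub_zero, Int.toNat_natCast]
  apply List.map_congr_left
  intro k hk
  have hklt : k < bs.length := List.mem_range.mp hk
  simp only [Function.comp_apply, zero_add]
  -- indices
  have hidx1 : PySem.List.pyGetD ((List.range bs.length).map
      (fun k => ['/'] ++ PySem.Chars.lower (List.intercalate ['/'] (bs.take (k+1))) ++ ".html".toList)) (k : Int) []
      = ['/'] ++ PySem.Chars.lower (List.intercalate ['/'] (bs.take (k+1))) ++ ".html".toList := by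
    rw [PySem.List.pyGetD_natCast]
    rw [List.getD_eq_getElem _ _ (by simpa using hklt)]
    simp
  have hidx2 : PySem.List.pyGetD (bs ++ [([] : List Char)]) (k : Int) [] = PySem.List.pyGetD bs (k : Int) [] := by
    rw [PySem.List.pyGetD_natCast, PySem.List.pyGetD_natCast]
    rw [List.getD_eq_getElem _ _ (by simp; omega), List.getD_eq_getElem _ _ hklt]
    rw [List.getElem_append_left hklt]
  rw [hidx1, hidx2]
  have hslice : PySem.List.slice bs none (some ((k : Int) + 1)) = bs.take (k+1) := by
    have h1 : ((k : Int) + 1) = ((k + 1 : Nat) : Int) := by push_cast; ring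
    rw [h1, PySem.List.slice_to _ (by positivity)]
    simp
  rw [hslice]
  have hjoin : PySem.Chars.join ['/'] (bs.take (k+1)) = List.intercalate ['/'] (bs.take (k+1)) := rfl
  rw [hjoin, lit_split]
  simp [List.append_assoc]

-- breadcrumbs pieces are '/'-free
theorem breadcrumbs_free (s : String) :
    ∀ b ∈ (PySem.List.slice (PySem.Chars.splitOn s.toList ['/']) (some 2) (some (-1))).map
      (fun f => pyTitle (PySem.Chars.replace f ".json".toList "".toList)), '/' ∉ b := by
  intro b hb
  rcases List.mem_map.mp hb with ⟨f, hf, rfl⟩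
  have hf2 : f ∈ PySem.Chars.splitOn s.toList ['/'] := PySem.List.mem_of_mem_slice _ _ _ hf
  have hfree : '/' ∉ f := splitOn_not_mem '/' s.toList f hf2
  apply pyTitle_not_mem_slash
  exact replace_not_mem '/' f ".json".toList "".toList (by decide) hfree (by decide)

-- ===== VERDICT (by name: the statement is the Claim_ definition above) =====
theorem generate_breadcrumbs_spec : Claim_equal_generate_breadcrumbs := by
  intro s _
  unfold Spec_generate_breadcrumbs generate_breadcrumbs generate_breadcrumbs_alt
  apply congrArg String.ofList
  apply congrArg (PySem.Chars.join [])
  exact main_lists _ (breadcrumbs_free s) _
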